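-- pv_equiv track=rewrite | github.com/droman42/wb-mqtt-bridge | src/wb_mqtt_bridge/infrastructure/devices/base.py | _get_initial_wb_control_state
-- ===== SOURCE A (Python) =====
-- def _get_initial_wb_control_state(handler_name: str) -> str:
--     """Get initial state value for WB control with enhanced defaults."""
--     handler_lower = handler_name.lower()
--
--     # Switch controls (0 = off, 1 = on)
--     if any(x in handler_lower for x in ['mute', 'unmute']):
--         return "0"  # Not muted
--
--     # Range controls with appropriate defaults
--     elif any(x in handler_lower for x in ['volume', 'vol']):
--         return "50"  # 50% volume
--     elif any(x in handler_lower for x in ['speed', 'fan']):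
--         return "0"  # Fan/speed off
--     elif any(x in handler_lower for x in ['brightness', 'contrast']):
--         return "75"  # 75% brightness/contrast
--     elif 'level' in handler_lower:
--         return "50"  # 50% level
--     elif any(x in handler_lower for x in ['temp', 'temperature']):
--         return "22"  # 22°C default temperature
--     elif 'set_' in handler_lower:
--         return "0"  # Generic setter default
--
--     # Text controls - empty or status strings
--     elif any(x in handler_lower for x in ['input', 'source', 'channel']):
--         return ""  # No input selected
--     elif any(x in handler_lower for x in ['app', 'application']):
--         return ""  # No app selected
--     elif any(x in handler_lower for x in ['status', 'state']):
--         return "unknown"  # Unknown status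
--     elif any(x in handler_lower for x in ['get_', 'list_', 'available']):
--         return ""  # Empty list/info
--
--     # Pushbutton controls (always 0 for non-pressed state)
--     elif any(x in handler_lower for x in [
--         'power_on', 'power_off', 'turn_on', 'turn_off',
--         'play', 'pause', 'stop', 'next', 'previous', 'forward', 'rewind',
--         'home', 'back', 'menu', 'up', 'down', 'left', 'right', 'ok', 'select',
--         'connect', 'disconnect', 'setup', 'reset', 'restart'
--     ]):
--         return "0"  # Not pressed
--
--     # Default for any other controls
--     else:
--         return "0"
-- ===== SOURCE B (Python) =====
-- _RULES = [
--     (['mute', 'unmute'], "0"),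
--     (['volume', 'vol'], "50"),
--     (['speed', 'fan'], "0"),
--     (['brightness', 'contrast'], "75"),
--     (['level'], "50"),
--     (['temp', 'temperature'], "22"),
--     (['set_'], "0"),
--     (['input', 'source', 'channel'], ""),
--     (['app', 'application'], ""),
--     (['status', 'state'], "unknown"),
--     (['get_', 'list_', 'available'], ""),
--     (['power_on', 'power_off', 'turn_on', 'turn_off',
--       'play', 'pause', 'stop', 'next', 'previous', 'forward', 'rewind',
--       'home', 'back', 'menu', 'up', 'down', 'left', 'right', 'ok', 'select',
--       'connect', 'disconnect', 'setup', 'reset', 'restart'], "0"),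
-- ]
--
-- # flattened (pattern, priority) index and the per-priority value table
-- _PATTERNS = [(p, i) for i, (pats, _) in enumerate(_RULES) for p in pats]
-- _VALUES = [v for _, v in _RULES]
--
--
-- def _get_initial_wb_control_state(handler_name: str) -> str:
--     """Collect the priorities of ALL matching patterns, then return the value
--     of the lowest (most specific) priority; '0' if nothing matches."""
--     low = handler_name.lower()
--     hits = [i for p, i in _PATTERNS if p in low]
--     if not hits:
--         return "0"
--     return _VALUES[min(hits)]
-- ===== Notes on version B (the rewrite author's own statement) =====
-- stated objective: alternative
-- what changed: Instead of testing conditions in order and returning at the first hit, B evaluates every pattern (no short-circuit), collects all matching rule priorities in one pass, then selects the minimum priority and looks its value up in a table.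
import Mathlib
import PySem

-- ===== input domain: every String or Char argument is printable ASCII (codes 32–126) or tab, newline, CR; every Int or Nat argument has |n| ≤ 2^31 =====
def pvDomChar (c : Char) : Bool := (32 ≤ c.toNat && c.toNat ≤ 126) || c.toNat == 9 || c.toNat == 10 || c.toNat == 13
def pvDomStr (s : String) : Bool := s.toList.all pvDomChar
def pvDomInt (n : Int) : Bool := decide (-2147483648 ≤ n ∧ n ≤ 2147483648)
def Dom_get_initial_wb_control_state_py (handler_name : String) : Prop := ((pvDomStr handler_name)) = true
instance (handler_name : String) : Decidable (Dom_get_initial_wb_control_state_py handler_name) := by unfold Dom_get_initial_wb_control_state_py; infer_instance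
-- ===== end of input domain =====

-- B replaces the short-circuit if/elif chain by collect-all-matching-priorities then min-select (objective: alternative).


-- ===== PORT A =====
def get_initial_wb_control_state_py (handler_name : String) : String :=
  let handler_lower := PySem.Str.lower handler_name
  if ["mute", "unmute"].any (fun x => PySem.Str.isIn x handler_lower) then "0"
  else if ["volume", "vol"].any (fun x => PySem.Str.isIn x handler_lower) then "50"
  else if ["speed", "fan"].any (fun x => PySem.Str.isIn x handler_lower) then "0"
  else if ["brightness", "contrast"].any (fun x => PySem.Str.isIn x handler_lower) then "75"
  else if PySem.Str.isIn "level" handler_lower then "50"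
  else if ["temp", "temperature"].any (fun x => PySem.Str.isIn x handler_lower) then "22"
  else if PySem.Str.isIn "set_" handler_lower then "0"
  else if ["input", "source", "channel"].any (fun x => PySem.Str.isIn x handler_lower) then ""
  else if ["app", "application"].any (fun x => PySem.Str.isIn x handler_lower) then ""
  else if ["status", "state"].any (fun x => PySem.Str.isIn x handler_lower) then "unknown"
  else if ["get_", "list_", "available"].any (fun x => PySem.Str.isIn x handler_lower) then ""
  else if ["power_on", "power_off", "turn_on", "turn_off",
    "play", "pause", "stop", "next", "previous", "forward", "rewind",
    "home", "back", "menu", "up", "down", "left", "right", "ok", "select",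
    "connect", "disconnect", "setup", "reset", "restart"].any
      (fun x => PySem.Str.isIn x handler_lower) then "0"
  else "0"

-- ===== PORT B =====
-- B's rule table (priority order = list position)
def wbRules : List (List String × String) :=
  [ (["mute", "unmute"], "0"),
    (["volume", "vol"], "50"),
    (["speed", "fan"], "0"),
    (["brightness", "contrast"], "75"),
    (["level"], "50"),
    (["temp", "temperature"], "22"),
    (["set_"], "0"),
    (["input", "source", "channel"], ""),
    (["app", "application"], ""),
    (["status", "state"], "unknown"),
    (["get_", "list_", "available"], ""),
    (["power_on", "power_off", "turn_on", "turn_off",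
      "play", "pause", "stop", "next", "previous", "forward", "rewind",
      "home", "back", "menu", "up", "down", "left", "right", "ok", "select",
      "connect", "disconnect", "setup", "reset", "restart"], "0") ]

-- Python's `[(p, i) for i, (pats, _) in enumerate(_RULES) for p in pats]`
def wbFlatIdx : Nat → List (List String × String) → List (String × Nat)
  | _, [] => []
  | i, (ps, _) :: rs => ps.map (fun p => (p, i)) ++ wbFlatIdx (i + 1) rs

def wbPatterns : List (String × Nat) := wbFlatIdx 0 wbRules
def wbValues : List String := wbRules.map Prod.snd

-- B: collect ALL matching priorities, then pick the minimum and index the value table.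
def get_initial_wb_control_state_py_alt (handler_name : String) : String :=
  let low := PySem.Str.lower handler_name
  let hits := (wbPatterns.filter (fun pi => PySem.Str.isIn pi.1 low)).map Prod.snd
  match PySem.List.min? hits (fun x => x) with
  | none => "0"
  | some j => wbValues.getD j "0"   -- j < 12 always, so getD is exact (Python never raises here)

-- ===== PRECONDITION & SPEC =====
def Spec_get_initial_wb_control_state_py (handler_name : String) (out : String) : Prop := out = get_initial_wb_control_state_py_alt handler_name
instance (handler_name : String) (out : String) : Decidable (Spec_get_initial_wb_control_state_py handler_name out) := by unfold Spec_get_initial_wb_control_state_py; infer_instance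

-- ===== CLAIM =====
def Claim_equal_get_initial_wb_control_state_py : Prop := ∀ (handler_name : String), Dom_get_initial_wb_control_state_py handler_name → Spec_get_initial_wb_control_state_py handler_name (get_initial_wb_control_state_py handler_name)

-- ===== LEMMAS AND PROOFS =====

-- A's if/elif chain, abstracted over the rule list (A's port literally unfolds to this on wbRules)
def wbChain (m : String → Bool) : List (List String × String) → String
  | [] => "0"
  | (ps, v) :: rs => if ps.any m then v else wbChain m rs

theorem wbFlatIdx_snd_ge (rs : List (List String × String)) :
    ∀ (i : Nat) (x : String × Nat), x ∈ wbFlatIdx i rs → i ≤ x.2 := by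
  induction rs with
  | nil => intro i x hx; simp [wbFlatIdx] at hx
  | cons r rs ih =>
    intro i x hx
    obtain ⟨ps, v⟩ := r
    simp only [wbFlatIdx, List.mem_append, List.mem_map] at hx
    rcases hx with ⟨p, _, rfl⟩ | hx
    · exact Nat.le_refl i
    · exact Nat.le_of_succ_le (ih (i + 1) x hx)

theorem min?_id_eq_of (l : List Nat) (a : Nat) (ha : a ∈ l) (hmin : ∀ y ∈ l, a ≤ y) :
    PySem.List.min? l (fun x => x) = some a := by
  cases hm : PySem.List.min? l (fun x => x) with
  | none =>
    rw [PySem.List.min?_eq_none_iff] at hm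
    subst hm; simp at ha
  | some b =>
    have hb := PySem.List.min?_mem hm
    have h1 : b ≤ a := PySem.List.min?_isMin hm a ha
    have h2 : a ≤ b := hmin b hb
    exact congrArg some (Nat.le_antisymm h1 h2)

theorem wbChain_eq_minSelect (m : String → Bool) (rs : List (List String × String)) :
    ∀ i : Nat,
      wbChain m rs =
        (match PySem.List.min?
            (((wbFlatIdx i rs).filter (fun pi => m pi.1)).map Prod.snd) (fun x => x) with
         | none => "0"
         | some j => (rs.map Prod.snd).getD (j - i) "0") := by
  induction rs with
  | nil => intro i; simp [wbChain, wbFlatIdx, PySem.List.min?]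
  | cons r rs ih =>
    intro i
    obtain ⟨ps, v⟩ := r
    have hrest : ∀ j ∈ ((wbFlatIdx (i + 1) rs).filter (fun pi => m pi.1)).map Prod.snd,
        i + 1 ≤ j := by
      intro j hj
      simp only [List.mem_map, List.mem_filter] at hj
      obtain ⟨x, ⟨hx, _⟩, rfl⟩ := hj
      exact wbFlatIdx_snd_ge rs (i + 1) x hx
    have hsplit :
        ((wbFlatIdx i ((ps, v) :: rs)).filter (fun pi => m pi.1)).map Prod.snd =
          (ps.filter m).map (fun _ => i) ++
            ((wbFlatIdx (i + 1) rs).filter (fun pi => m pi.1)).map Prod.snd := by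
      simp only [wbFlatIdx, List.filter_append, List.filter_map, List.map_append, List.map_map]
      rfl
    by_cases h : ps.any m = true
    · -- head rule matches: some pattern of priority i is in the hits, and all hits are ≥ i
      have hne : ps.filter m ≠ [] := by
        simpa [← List.filter_eq_nil_iff (p := m), List.any_eq_true] using h
      obtain ⟨q, qs, hq⟩ := List.exists_cons_of_ne_nil hne
      have hmem : i ∈ ((wbFlatIdx i ((ps, v) :: rs)).filter (fun pi => m pi.1)).map Prod.snd := by
        rw [hsplit, hq]; simp
      have hall : ∀ y ∈ ((wbFlatIdx i ((ps, v) :: rs)).filter (fun pi => m pi.1)).map Prod.snd,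
          i ≤ y := by
        intro y hy
        rw [hsplit] at hy
        rcases List.mem_append.mp hy with hy | hy
        · simp only [List.mem_map] at hy; obtain ⟨_, _, rfl⟩ := hy; exact Nat.le_refl i
        · exact Nat.le_of_succ_le (hrest y hy)
      rw [min?_id_eq_of _ i hmem hall]
      simp [wbChain, h]
    · -- head rule does not match: no priority-i hits, defer to the tail at i+1
      have hfe : ps.filter m = [] := by
        simpa [List.filter_eq_nil_iff, List.any_eq_true] using h
      rw [hsplit, hfe]
      simp only [List.map_nil, List.nil_append]
      rw [wbChain, if_neg h, ih (i + 1)]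
      cases hm : PySem.List.min?
          (((wbFlatIdx (i + 1) rs).filter (fun pi => m pi.1)).map Prod.snd) (fun x => x) with
      | none => rfl
      | some j =>
        have hj : i + 1 ≤ j := hrest j (PySem.List.min?_mem hm)
        have : j - i = (j - (i + 1)) + 1 := by omega
        simp [this]

theorem portA_eq_chain (handler_name : String) :
    get_initial_wb_control_state_py handler_name =
      wbChain (fun p => PySem.Str.isIn p (PySem.Str.lower handler_name)) wbRules := by
  simp only [get_initial_wb_control_state_py, wbRules, wbChain,
    List.any_cons, List.any_nil, Bool.or_false]

-- ===== VERDICT =====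
theorem get_initial_wb_control_state_py_spec : Claim_equal_get_initial_wb_control_state_py := by
  intro handler_name _
  unfold Spec_get_initial_wb_control_state_py
  rw [portA_eq_chain]
  show _ = let low := PySem.Str.lower handler_name; _
  simp only [get_initial_wb_control_state_py_alt, wbPatterns, wbValues]
  rw [wbChain_eq_minSelect (fun p => PySem.Str.isIn p (PySem.Str.lower handler_name)) wbRules 0]
  simp
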